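-- pv_equiv track=rewrite | github.com/dddwsd/algorithm | codility/2016/1_rectangle_builder_greater_area.py | solution
-- ===== SOURCE A (Python) =====
-- from collections import defaultdict
-- from collections import defaultdict
-- from collections import defaultdict
--
-- def solution(A, X):
--     # write your code in Python 3.6
--     answer = 0
--     A = sorted(A)
--     fence_count = defaultdict(int)
--     rec_dic = {}
--
--     for fence in A:
--         fence_count[fence] += 1
--         if fence_count[fence] == 2:
--             for side in rec_dic:
--                 if side * fence >= X:
--                     rec_dic[side].append(fence)
--             rec_dic[fence] = []
--         if fence_count[fence] == 4:
--             if fence ** 2 >= X: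
--                 rec_dic[fence].append(fence)
--
--     for values in rec_dic.values():
--         answer += len(values)
--     return answer
-- ===== SOURCE B (Python) =====
-- from collections import Counter
--
--
-- def solution(A, X):
--     # Direct combinatorial count over the distinct usable lengths (count >= 2),
--     # instead of simulating the incremental dict-of-lists construction.
--     cnt = Counter(A)
--     sides = sorted(v for v, c in cnt.items() if c >= 2)
--
--     def pairs(s):
--         if not s:
--             return 0
--         head, rest = s[0], s[1:]
--         return sum(1 for b in rest if head * b >= X) + pairs(rest)
--
--     squares = sum(1 for v in sides if cnt[v] >= 4 and v * v >= X)
--     return pairs(sides) + squares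
-- ===== Notes on version B (the rewrite author's own statement) =====
-- stated objective: alternative
-- what changed: B drops A's incremental simulation (sorting the full multiset and maintaining a counting dict plus a dict of partner-lists that is scanned and appended to at each 'count reached 2/4' event) and instead counts directly: build a Counter once, take the sorted distinct lengths with count >= 2, count the qualifying pairs by a simple recursion over that list and the squares by one extra pass.
import Mathlib
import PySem

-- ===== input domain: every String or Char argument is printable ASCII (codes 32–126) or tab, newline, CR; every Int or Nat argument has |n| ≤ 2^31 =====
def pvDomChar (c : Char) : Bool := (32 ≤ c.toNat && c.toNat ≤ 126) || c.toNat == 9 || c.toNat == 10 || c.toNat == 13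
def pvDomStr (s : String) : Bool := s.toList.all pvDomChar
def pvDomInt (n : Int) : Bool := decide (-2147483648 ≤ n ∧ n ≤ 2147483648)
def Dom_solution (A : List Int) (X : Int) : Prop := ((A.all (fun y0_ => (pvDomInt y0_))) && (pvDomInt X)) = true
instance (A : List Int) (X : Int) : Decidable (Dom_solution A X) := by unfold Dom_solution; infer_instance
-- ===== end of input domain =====

-- B replaces A's incremental dict-of-lists simulation by a direct combinatorial
-- count over the distinct usable lengths (objective: alternative decomposition).

-- ===== PORT A =====
-- body of A's main loop: fence_count[fence] += 1 and the "== 2" / "== 4" events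
def stepA (X : Int) (st : PySem.Dict Int Int × PySem.Dict Int (List Int)) (fence : Int) :
    PySem.Dict Int Int × PySem.Dict Int (List Int) :=
  let fc := st.1.modify fence 0 (· + 1)
  let rd := st.2
  let rd :=
    if fc.getD fence 0 = 2 then
      -- for side in rec_dic: if side * fence >= X: rec_dic[side].append(fence); rec_dic[fence] = []
      (rd.keys.foldl (fun d side =>
        if side * fence ≥ X then d.modify side [] (· ++ [fence]) else d) rd).insert fence []
    else rd
  let rd :=
    if fc.getD fence 0 = 4 then
      if fence ^ 2 ≥ X then rd.modify fence [] (· ++ [fence]) else rd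
    else rd
  (fc, rd)

def solution (A : List Int) (X : Int) : Int :=
  let answer : Int := 0
  let A' := PySem.List.sorted A (fun x => x)
  let st := A'.foldl (stepA X) (PySem.Dict.empty, PySem.Dict.empty)
  st.2.values.foldl (fun answer values => answer + (values.length : Int)) answer

-- ===== PORT B =====
-- pairs(s): for the head, count later partners b with head * b >= X, then recurse
def pairsB (X : Int) : List Int → Int
  | [] => 0
  | head :: rest =>
      ((rest.filter (fun b => decide (head * b ≥ X))).length : Int) + pairsB X rest

def solution_alt (A : List Int) (X : Int) : Int :=
  let cnt := PySem.Dict.counter A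
  let sides := PySem.List.sorted
    ((cnt.items.filter (fun p => decide (p.2 ≥ 2))).map (fun p => p.1)) (fun x => x)
  let squares : Int :=
    ((sides.filter (fun v => decide (cnt.getD v 0 ≥ 4) && decide (v * v ≥ X))).length : Int)
  pairsB X sides + squares

-- ===== PRECONDITION & SPEC =====
def Spec_solution (A : List Int) (X : Int) (out : Int) : Prop := out = solution_alt A X
instance (A : List Int) (X : Int) (out : Int) : Decidable (Spec_solution A X out) := by unfold Spec_solution; infer_instance

-- ===== CLAIM (what is proved, stated in full; the proofs are below) =====
def Claim_equal_solution : Prop := ∀ (A : List Int) (X : Int), Dom_solution A X → Spec_solution A X (solution A X)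

-- ===== LEMMAS AND PROOFS =====

-- sum of the lengths of all lists stored in rec_dic
def gsum (d : PySem.Dict Int (List Int)) : Int :=
  (d.values.map (fun l => ((l.length : Nat) : Int))).sum

-- number of "square" entries among ks, w.r.t. the multiset p of processed fences
def sqCount (X : Int) (p ks : List Int) : Int :=
  ((ks.filter (fun v => decide (4 ≤ p.count v) && decide (X ≤ v * v))).length : Int)

lemma pairsB_append (X : Int) (l : List Int) (w : Int) :
    pairsB X (l ++ [w]) = pairsB X l + ((l.filter (fun a => decide (a * w ≥ X))).length : Int) := by
  induction l with
  | nil => simp [pairsB]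
  | cons a rest ih =>
      simp only [List.cons_append, pairsB, ih, List.filter_append, List.length_append]
      have h1 : (List.filter (fun x => decide (x * w ≥ X)) (a :: rest)).length
          = (if a * w ≥ X then 1 else 0) + (List.filter (fun x => decide (x * w ≥ X)) rest).length := by
        rw [List.filter_cons]
        by_cases h : a * w ≥ X
        · simp [h]
          omega
        · simp [h]
      have h2 : (List.filter (fun b => decide (a * b ≥ X)) [w]).length
          = (if a * w ≥ X then 1 else 0) := by
        by_cases h : a * w ≥ X <;> simp [h]
      rw [h1, h2]
      by_cases h : a * w ≥ X
      · rw [if_pos h]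
        push_cast
        ring
      · rw [if_neg h]
        push_cast
        ring

lemma sum_map_update (ks : List Int) (k : Int) (f f' : Int → Int)
    (hnd : ks.Nodup) (hk : k ∈ ks)
    (hne : ∀ v ∈ ks, v ≠ k → f' v = f v) (hkk : f' k = f k + 1) :
    (ks.map f').sum = (ks.map f).sum + 1 := by
  induction ks with
  | nil => simp at hk
  | cons a t ih =>
      rcases List.nodup_cons.mp hnd with ⟨hna, hnt⟩
      rcases List.mem_cons.mp hk with rfl | hkt
      · have ht : ∀ v ∈ t, f' v = f v := fun v hv =>
          hne v (List.mem_cons_of_mem _ hv) (fun h => hna (h ▸ hv))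
        simp only [List.map_cons, List.sum_cons, hkk, List.map_congr_left ht]
        ring
      · have hak : a ≠ k := fun h => hna (h ▸ hkt)
        have ha : f' a = f a := hne a (List.mem_cons_self) hak
        have := ih hnt hkt (fun v hv hvk => hne v (List.mem_cons_of_mem _ hv) hvk)
        simp only [List.map_cons, List.sum_cons, ha, this]
        ring

lemma countP_update (ks : List Int) (k : Int) (p q : Int → Bool)
    (hnd : ks.Nodup) (hk : k ∈ ks)
    (hne : ∀ v ∈ ks, v ≠ k → q v = p v) (hpk : p k = false) :
    ks.countP q = ks.countP p + (if q k then 1 else 0) := by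
  induction ks with
  | nil => simp at hk
  | cons a t ih =>
      rcases List.nodup_cons.mp hnd with ⟨hna, hnt⟩
      rcases List.mem_cons.mp hk with rfl | hkt
      · have ht : ∀ v ∈ t, q v = p v := fun v hv =>
          hne v (List.mem_cons_of_mem _ hv) (fun h => hna (h ▸ hv))
        have hteq : t.countP q = t.countP p := List.countP_congr (by intro v hv; simp [ht v hv])
        simp only [List.countP_cons, hteq, hpk]
        by_cases hq : q k <;> simp [hq]
      · have hak : a ≠ k := fun h => hna (h ▸ hkt)
        have ha : q a = p a := hne a (List.mem_cons_self) hak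
        have := ih hnt hkt (fun v hv hvk => hne v (List.mem_cons_of_mem _ hv) hvk)
        simp only [List.countP_cons, this, ha]
        omega

lemma gsum_modify (d : PySem.Dict Int (List Int)) (k x : Int)
    (hnd : d.keys.Nodup) (hk : k ∈ d.keys) :
    gsum (d.modify k [] (· ++ [x])) = gsum d + 1 ∧ (d.modify k [] (· ++ [x])).keys = d.keys := by
  have hcont : d.contains k = true := (PySem.Dict.contains_iff_mem_keys d k).mpr hk
  have hkeys : (d.modify k [] (· ++ [x])).keys = d.keys := by
    rw [PySem.Dict.keys_modify, PySem.Dict.keys_insert_of_contains _ _ hcont]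
  refine ⟨?_, hkeys⟩
  have hnd' : (d.modify k [] (· ++ [x])).keys.Nodup := hkeys ▸ hnd
  unfold gsum
  rw [PySem.Dict.values_eq_map_keys _ hnd [], PySem.Dict.values_eq_map_keys _ hnd' [], hkeys,
    List.map_map, List.map_map]
  refine sum_map_update d.keys k _ _ hnd hk ?_ ?_
  · intro v hv hvk
    simp [Function.comp, PySem.Dict.getD_modify, hvk]
  · simp [Function.comp]

lemma inner_loop (X fence : Int) (ts : List Int) (d : PySem.Dict Int (List Int))
    (hnd : d.keys.Nodup) (hts : ∀ t ∈ ts, t ∈ d.keys) :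
    (ts.foldl (fun d side => if side * fence ≥ X then d.modify side [] (· ++ [fence]) else d) d).keys = d.keys ∧
    gsum (ts.foldl (fun d side => if side * fence ≥ X then d.modify side [] (· ++ [fence]) else d) d)
      = gsum d + ((ts.filter (fun a => decide (a * fence ≥ X))).length : Int) := by
  induction ts generalizing d with
  | nil => simp
  | cons a t ih =>
      have ha : a ∈ d.keys := hts a (List.mem_cons_self)
      by_cases h : a * fence ≥ X
      · have hm := gsum_modify d a fence hnd ha
        have ih' := ih (d.modify a [] (· ++ [fence])) (hm.2 ▸ hnd)
          (fun v hv => hm.2 ▸ hts v (List.mem_cons_of_mem _ hv))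
        have hfl : List.filter (fun a => decide (a * fence ≥ X)) (a :: t)
            = a :: List.filter (fun a => decide (a * fence ≥ X)) t := by
          rw [List.filter_cons]; simp [h]
        rw [List.foldl_cons, if_pos h, hfl]
        refine ⟨ih'.1.trans hm.2, ?_⟩
        rw [ih'.2, hm.1]
        push_cast [List.length_cons]
        ring
      · have ih' := ih d hnd (fun v hv => hts v (List.mem_cons_of_mem _ hv))
        have hfl : List.filter (fun a => decide (a * fence ≥ X)) (a :: t)
            = List.filter (fun a => decide (a * fence ≥ X)) t := by
          rw [List.filter_cons]; simp [h]
        rw [List.foldl_cons, if_neg h, hfl]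
        exact ⟨ih'.1, ih'.2⟩

lemma gsum_insert_nil (d : PySem.Dict Int (List Int)) (k : Int)
    (h : d.contains k = false) : gsum (d.insert k []) = gsum d := by
  unfold gsum
  rw [PySem.Dict.values, PySem.Dict.items_insert_of_not_contains d [] h]
  simp [PySem.Dict.values]

lemma loopA_inv (X : Int) (l : List Int) :
    ∀ (p ks : List Int) (fc : PySem.Dict Int Int) (rd : PySem.Dict Int (List Int)),
    (p ++ l).Pairwise (· ≤ ·) →
    (∀ v, fc.getD v 0 = (p.count v : Int)) →
    rd.keys = ks →
    ks.Pairwise (· < ·) →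
    (∀ v, v ∈ ks ↔ 2 ≤ p.count v) →
    gsum rd = pairsB X ks + sqCount X p ks →
    ∃ ks',
      (l.foldl (stepA X) (fc, rd)).2.keys = ks' ∧
      ks'.Pairwise (· < ·) ∧
      (∀ v, v ∈ ks' ↔ 2 ≤ (p ++ l).count v) ∧
      gsum (l.foldl (stepA X) (fc, rd)).2 = pairsB X ks' + sqCount X (p ++ l) ks' := by
  induction l with
  | nil =>
      intro p ks fc rd _ _ hkeys hlt hmem hg
      exact ⟨ks, by simpa using hkeys, hlt, by simpa using hmem, by simpa using hg⟩
  | cons fence l' ih =>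
      intro p ks fc rd hsorted hfc hkeys hlt hmem hg
      have hnd : ks.Nodup := hlt.imp (fun h => ne_of_lt h)
      have hndk : rd.keys.Nodup := hkeys ▸ hnd
      have hcf : (fc.modify fence 0 (· + 1)).getD fence 0 = (p.count fence : Int) + 1 := by
        rw [PySem.Dict.getD_modify]; simp [hfc fence]
      have hcount' : ∀ v, (p ++ [fence]).count v = p.count v + (if v = fence then 1 else 0) := by
        intro v
        by_cases hv : v = fence
        · subst hv; simp [List.count_append]
        · have hv' := Ne.symm hv
          simp [List.count_append, hv, hv']
      have hfc' : ∀ v, (fc.modify fence 0 (· + 1)).getD v 0 = (((p ++ [fence]).count v : Nat) : Int) := by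
        intro v
        rw [PySem.Dict.getD_modify, hcount' v]
        by_cases hv : v = fence
        · subst hv; simp [hfc]
        · simp [hv, hfc v]
      have hsorted' : ((p ++ [fence]) ++ l').Pairwise (· ≤ ·) := by
        simpa [List.append_assoc] using hsorted
      have hple : ∀ a ∈ p, a ≤ fence := by
        intro a hap
        exact (List.pairwise_append.mp hsorted).2.2 a hap fence List.mem_cons_self
      have happ : p ++ fence :: l' = (p ++ [fence]) ++ l' := by simp
      rw [List.foldl_cons]
      by_cases h2 : (p.count fence : Int) + 1 = 2
      · -- second occurrence of fence: it becomes usable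
        have hc1 : p.count fence = 1 := by omega
        have hnotmem : fence ∉ ks := fun hmemf => by
          have := (hmem fence).mp hmemf; omega
        have hinner := inner_loop X fence rd.keys rd hndk (fun t ht => ht)
        have hcont1 : (rd.keys.foldl (fun d side =>
            if side * fence ≥ X then d.modify side [] (· ++ [fence]) else d) rd).contains fence = false := by
          rw [PySem.Dict.contains_eq_decide_mem_keys, hinner.1, hkeys]
          simp [hnotmem]
        have hstep : stepA X (fc, rd) fence = (fc.modify fence 0 (· + 1),
            (rd.keys.foldl (fun d side =>
              if side * fence ≥ X then d.modify side [] (· ++ [fence]) else d) rd).insert fence []) := by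
          simp only [stepA]
          rw [hcf, if_neg (by omega : ¬((p.count fence : Int) + 1 = 4)), if_pos h2]
        have hkeys2 : ((rd.keys.foldl (fun d side =>
            if side * fence ≥ X then d.modify side [] (· ++ [fence]) else d) rd).insert fence []).keys
            = ks ++ [fence] := by
          rw [PySem.Dict.keys_insert_of_not_contains _ _ hcont1, hinner.1, hkeys]
        have hlt2 : (ks ++ [fence]).Pairwise (· < ·) := by
          rw [List.pairwise_append]
          refine ⟨hlt, List.pairwise_singleton _ _, ?_⟩
          intro a ha b hb
          have hb' : b = fence := by simpa using hb
          rw [hb']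
          have hcnt : 2 ≤ p.count a := (hmem a).mp ha
          have hmemp : a ∈ p := List.count_pos_iff.mp (by omega)
          have hne : a ≠ fence := fun h => hnotmem (h ▸ ha)
          exact lt_of_le_of_ne (hple a hmemp) hne
        have hmem2 : ∀ v, v ∈ ks ++ [fence] ↔ 2 ≤ (p ++ [fence]).count v := by
          intro v
          rw [hcount' v, List.mem_append]
          by_cases hv : v = fence
          · subst hv; simp [hc1]
          · simp [hv, hmem v]
        have hsq2 : sqCount X (p ++ [fence]) (ks ++ [fence]) = sqCount X p ks := by
          unfold sqCount
          rw [List.filter_append]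
          have h1 : List.filter (fun v => decide (4 ≤ (p ++ [fence]).count v) && decide (X ≤ v * v)) [fence] = [] := by
            simp [hc1]
          have h0 : List.filter (fun v => decide (4 ≤ (p ++ [fence]).count v) && decide (X ≤ v * v)) ks
              = List.filter (fun v => decide (4 ≤ p.count v) && decide (X ≤ v * v)) ks := by
            refine List.filter_congr ?_
            intro v hv
            have hvne : v ≠ fence := fun h => hnotmem (h ▸ hv)
            rw [hcount' v, if_neg hvne]
            simp
          rw [h1, h0, List.append_nil]
        have hg2 : gsum ((rd.keys.foldl (fun d side =>
            if side * fence ≥ X then d.modify side [] (· ++ [fence]) else d) rd).insert fence [])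
            = pairsB X (ks ++ [fence]) + sqCount X (p ++ [fence]) (ks ++ [fence]) := by
          rw [gsum_insert_nil _ _ hcont1, hinner.2, hkeys, hg, pairsB_append, hsq2]
          ring
        rw [hstep]
        obtain ⟨ks2, hk2, hlt2', hmem2', hg2'⟩ := ih (p ++ [fence]) (ks ++ [fence]) _ _
          hsorted' hfc' hkeys2 hlt2 hmem2 hg2
        exact ⟨ks2, hk2, hlt2', by rw [happ]; exact hmem2', by rw [happ]; exact hg2'⟩
      · by_cases h4 : (p.count fence : Int) + 1 = 4
        · -- fourth occurrence of fence: possible square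
          have hc3 : p.count fence = 3 := by omega
          have hmemf : fence ∈ ks := (hmem fence).mpr (by omega)
          have hmem2 : ∀ v, v ∈ ks ↔ 2 ≤ (p ++ [fence]).count v := by
            intro v
            rw [hcount' v]
            by_cases hv : v = fence
            · subst hv; simp [hc3, hmemf]
            · simp [hv, hmem v]
          have hsqq : sqCount X (p ++ [fence]) ks
              = sqCount X p ks + (if X ≤ fence * fence then 1 else 0) := by
            unfold sqCount
            rw [← List.countP_eq_length_filter, ← List.countP_eq_length_filter]
            have hcp := countP_update ks fence
              (fun v => decide (4 ≤ p.count v) && decide (X ≤ v * v))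
              (fun v => decide (4 ≤ (p ++ [fence]).count v) && decide (X ≤ v * v))
              hnd hmemf
              (by
                intro v hv hvne
                simp only []
                rw [hcount' v, if_neg hvne]
                simp)
              (by simp [hc3])
            have hval : (p ++ [fence]).count fence = 4 := by
              rw [hcount' fence, if_pos rfl, hc3]
            by_cases hx : X ≤ fence * fence
            · rw [hcp]
              simp [hval, hx]
            · rw [hcp]
              simp [hval, hx]
          by_cases hx : fence ^ 2 ≥ X
          · have hstep : stepA X (fc, rd) fence
                = (fc.modify fence 0 (· + 1), rd.modify fence [] (· ++ [fence])) := by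
              simp only [stepA]
              rw [hcf, if_neg h2, if_pos h4, if_pos hx]
            have hm := gsum_modify rd fence fence hndk (hkeys ▸ hmemf)
            have hg2 : gsum (rd.modify fence [] (· ++ [fence]))
                = pairsB X ks + sqCount X (p ++ [fence]) ks := by
              rw [hm.1, hg, hsqq, if_pos (by rw [← pow_two]; exact hx)]
              ring
            rw [hstep]
            obtain ⟨ks2, hk2, hlt2', hmem2', hg2'⟩ := ih (p ++ [fence]) ks _ _
              hsorted' hfc' (hm.2.trans hkeys) hlt hmem2 hg2
            exact ⟨ks2, hk2, hlt2', by rw [happ]; exact hmem2', by rw [happ]; exact hg2'⟩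
          · have hstep : stepA X (fc, rd) fence = (fc.modify fence 0 (· + 1), rd) := by
              simp only [stepA]
              rw [hcf, if_neg h2, if_pos h4, if_neg hx]
            have hg2 : gsum rd = pairsB X ks + sqCount X (p ++ [fence]) ks := by
              rw [hg, hsqq, if_neg (by rw [← pow_two]; exact hx)]
              ring
            rw [hstep]
            obtain ⟨ks2, hk2, hlt2', hmem2', hg2'⟩ := ih (p ++ [fence]) ks _ _
              hsorted' hfc' hkeys hlt hmem2 hg2
            exact ⟨ks2, hk2, hlt2', by rw [happ]; exact hmem2', by rw [happ]; exact hg2'⟩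
        · -- no event: counters move, rec_dic untouched
          have hstep : stepA X (fc, rd) fence = (fc.modify fence 0 (· + 1), rd) := by
            simp only [stepA]
            rw [hcf, if_neg h2, if_neg h4]
          have hmem2 : ∀ v, v ∈ ks ↔ 2 ≤ (p ++ [fence]).count v := by
            intro v
            rw [hcount' v]
            by_cases hv : fence = v
            · subst hv
              rw [if_pos rfl]
              constructor
              · intro hvk; have := (hmem fence).mp hvk; omega
              · intro hge
                refine (hmem fence).mpr ?_
                omega
            · have hv' : ¬(v = fence) := fun h => hv h.symm
              simp [hv', hmem v]
          have hsq2 : sqCount X (p ++ [fence]) ks = sqCount X p ks := by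
            unfold sqCount
            refine congrArg _ (congrArg _ (List.filter_congr ?_))
            intro v hv
            by_cases hvf : fence = v
            · subst hvf
              have hv2 : 2 ≤ p.count fence := (hmem fence).mp hv
              have hiff : (4 ≤ (p ++ [fence]).count fence) ↔ (4 ≤ p.count fence) := by
                rw [hcount' fence, if_pos rfl]
                omega
              rw [decide_eq_decide.mpr hiff]
            · have hvf' : ¬(v = fence) := fun h => hvf h.symm
              rw [hcount' v, if_neg hvf']
              simp
          have hg2 : gsum rd = pairsB X ks + sqCount X (p ++ [fence]) ks := by
            rw [hg, hsq2]
          rw [hstep]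
          obtain ⟨ks2, hk2, hlt2', hmem2', hg2'⟩ := ih (p ++ [fence]) ks _ _
            hsorted' hfc' hkeys hlt hmem2 hg2
          exact ⟨ks2, hk2, hlt2', by rw [happ]; exact hmem2', by rw [happ]; exact hg2'⟩

lemma solution_eq (A : List Int) (X : Int) : solution A X = solution_alt A X := by
  obtain ⟨ks', hkeys, hlt, hmem, hg⟩ :=
    loopA_inv X (PySem.List.sorted A (fun x => x)) [] [] PySem.Dict.empty PySem.Dict.empty
      (by simpa using PySem.List.sorted_pairwise A (fun x => x))
      (by intro v; simp [PySem.Dict.getD_empty])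
      PySem.Dict.keys_empty
      List.Pairwise.nil
      (by intro v; simp)
      (by simp [gsum, pairsB, sqCount]; rfl)
  simp only [List.nil_append] at hmem hg
  have hndks : ks'.Nodup := hlt.imp (fun h => ne_of_lt h)
  have hcnt : ∀ v, (PySem.List.sorted A (fun x => x)).count v = A.count v := fun v =>
    (PySem.List.sorted_perm A (fun x => x) false).count_eq v
  -- B's distinct usable sides
  have hfilter : ((PySem.Dict.counter A).items.filter (fun p => decide (p.2 ≥ 2))).map (fun p => p.1)
      = (PySem.Set.ofList A).filter (fun k => decide ((A.count k : Int) ≥ 2)) := by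
    rw [PySem.Dict.items_counter, List.filter_map, List.map_map]
    simp [Function.comp_def]
  have hndfil : ((PySem.Set.ofList A).filter (fun k => decide ((A.count k : Int) ≥ 2))).Nodup :=
    (PySem.Set.nodup_ofList A).filter _
  have hmemfil : ∀ v, v ∈ (PySem.Set.ofList A).filter (fun k => decide ((A.count k : Int) ≥ 2))
      ↔ 2 ≤ A.count v := by
    intro v
    rw [List.mem_filter, PySem.Set.mem_ofList]
    constructor
    · rintro ⟨-, h⟩
      have : (2 : Int) ≤ (A.count v : Int) := of_decide_eq_true h
      exact_mod_cast this
    · intro h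
      refine ⟨List.count_pos_iff.mp (by omega), decide_eq_true ?_⟩
      exact_mod_cast h
  have hperm : ks'.Perm ((PySem.Set.ofList A).filter (fun k => decide ((A.count k : Int) ≥ 2))) := by
    rw [List.perm_ext_iff_of_nodup hndks hndfil]
    intro v
    rw [hmem v, hcnt v, hmemfil v]
  have hsides : PySem.List.sorted
      (((PySem.Dict.counter A).items.filter (fun p => decide (p.2 ≥ 2))).map (fun p => p.1))
      (fun x => x) = ks' := by
    rw [hfilter]
    exact PySem.List.sorted_eq_of_perm_of_pairwise_lt _ ks' _ hperm hlt
  have hsq : ((ks'.filter (fun v =>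
      decide ((PySem.Dict.counter A).getD v 0 ≥ 4) && decide (v * v ≥ X))).length : Int)
      = sqCount X (PySem.List.sorted A (fun x => x)) ks' := by
    unfold sqCount
    congr 1
    refine congrArg _ (List.filter_congr ?_)
    intro v hv
    rw [PySem.Dict.getD_counter]
    congr 1
    rw [decide_eq_decide]
    rw [hcnt v]
    constructor
    · intro h; exact_mod_cast h
    · intro h; exact_mod_cast h
  simp only [solution, solution_alt]
  rw [PySem.List.foldl_add, hsides, hsq]
  unfold gsum at hg
  rw [hg]
  ring

-- ===== VERDICT (by name: the statement is the Claim_ definition above) =====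
theorem solution_spec : Claim_equal_solution := by
  intro A X _
  unfold Spec_solution
  exact solution_eq A X
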